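-- pv_equiv track=rewrite | github.com/Ymduran/Curso-Python-POO | codewars/Segundo_Parcial/get_ascii_value_of_character.py | get_ascii
-- ===== SOURCE A (Python) =====
-- def get_ascii(ch: str) -> int:
--     """
--     Calcula el valor ASCII del carácter recibido sin usar ord().
--
--     Parámetro:
--     ch (str): Un solo carácter.
--
--     Retorna:
--     int: Valor ASCII del carácter.
--     """
--     caracteres = ""
--     for i in range(128):
--         caracteres += chr(i)
--
--     posicion = -1
--     for i in range(len(caracteres)):
--         if caracteres[i] == ch:
--             posicion = i
--             break
--
--     return posicion
-- ===== SOURCE B (Python) =====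
-- def get_ascii(ch: str) -> int:
--     # Closed form: no table building, no scan.
--     return ord(ch) if len(ch) == 1 and ord(ch) < 128 else -1
-- ===== Notes on version B (the rewrite author's own statement) =====
-- stated objective: faster
-- what changed: Replaces building a 128-character table (quadratic string concatenation) and linearly scanning it with a direct closed form via ord(), guarded by a length-1 and code<128 check.
import Mathlib
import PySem

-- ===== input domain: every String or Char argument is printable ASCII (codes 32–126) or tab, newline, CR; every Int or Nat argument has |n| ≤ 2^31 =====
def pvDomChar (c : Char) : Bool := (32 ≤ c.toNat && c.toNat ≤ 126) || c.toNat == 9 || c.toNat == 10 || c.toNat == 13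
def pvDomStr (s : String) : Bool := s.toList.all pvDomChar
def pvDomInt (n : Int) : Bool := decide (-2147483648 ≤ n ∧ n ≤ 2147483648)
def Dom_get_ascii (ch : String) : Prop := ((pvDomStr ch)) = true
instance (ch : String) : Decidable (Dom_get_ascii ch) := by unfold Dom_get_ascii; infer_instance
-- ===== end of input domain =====

-- B replaces A's build-a-128-char-table-and-scan with a direct closed form via ord() (constant work per call).

-- ===== PORT A =====
-- the loop 'for i in range(len(caracteres)): if caracteres[i] == ch: posicion = i; break'
-- (break = return the index; falling off the list leaves posicion = -1; pyGet? none is unreachable)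
def pvScanA (cs : List Char) (t : List Char) : List Int → Int
  | [] => -1
  | i :: rest =>
    match PySem.List.pyGet? cs i with
    | some c => if [c] = t then i else pvScanA cs t rest
    | none => -1

def get_ascii (ch : String) : Int :=
  -- caracteres = ""; for i in range(128): caracteres += chr(i)
  let caracteres : List Char :=
    (PySem.List.pyRange 0 128 1).foldl (fun acc i => acc ++ [Char.ofNat i.toNat]) []
  pvScanA caracteres ch.toList (PySem.List.pyRange 0 (caracteres.length : Int) 1)

-- ===== PORT B =====
def get_ascii_alt (ch : String) : Int :=
  -- return ord(ch) if len(ch) == 1 and ord(ch) < 128 else -1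
  match ch.toList with
  | [c] => if (c.toNat : Int) < 128 then (c.toNat : Int) else -1
  | _ => -1

-- ===== PRECONDITION & SPEC =====
def Spec_get_ascii (ch : String) (out : Int) : Prop := out = get_ascii_alt ch
instance (ch : String) (out : Int) : Decidable (Spec_get_ascii ch out) := by unfold Spec_get_ascii; infer_instance

-- ===== CLAIM (what is proved, stated in full; the proofs are below) =====
def Claim_equal_get_ascii : Prop := ∀ (ch : String), Dom_get_ascii ch → Spec_get_ascii ch (get_ascii ch)

-- ===== LEMMAS AND PROOFS =====

lemma pvScanA_cons (cs t : List Char) (i : Int) (rest : List Int) :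
    pvScanA cs t (i :: rest) =
      (match PySem.List.pyGet? cs i with
       | some c => if [c] = t then i else pvScanA cs t rest
       | none => -1) := rfl

-- A's table is chr(0), …, chr(127)
def pvTable : List Char := (List.range 128).map Char.ofNat

lemma pvTable_eq :
    (PySem.List.pyRange 0 128 1).foldl (fun acc i => acc ++ [Char.ofNat i.toNat]) [] = pvTable := by
  rw [PySem.List.foldl_append_singleton_eq_map, PySem.List.pyRange_one]
  simp [pvTable, List.map_map, Function.comp]

lemma pvTable_get (a : Nat) (h : a < 128) :
    PySem.List.pyGet? pvTable (a : Int) = some (Char.ofNat a) := by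
  rw [PySem.List.pyGet?_natCast]
  simp [pvTable, h]

lemma pvOfNat_toNat (a : Nat) (h : a < 128) : (Char.ofNat a).toNat = a := by
  have hv : a.isValidChar := Or.inl (by omega)
  simp [Char.ofNat, hv, Char.ofNatAux, Char.toNat]

-- scanning the window [a, a+k) of the table finds c.toNat iff ch is the single char c with code in the window
lemma pvScan_spec (t : List Char) (k : Nat) : ∀ (a : Nat), a + k ≤ 128 →
    pvScanA pvTable t (List.map (fun n : Nat => (n : Int)) (List.range' a k)) =
      (match t with
       | [c] => if a ≤ c.toNat ∧ c.toNat < a + k then (c.toNat : Int) else -1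
       | _ => -1) := by
  induction k with
  | zero =>
    intro a _
    cases t with
    | nil => simp [pvScanA]
    | cons c rest => cases rest <;> simp [pvScanA]
  | succ k ih =>
    intro a ha
    rw [List.range'_succ]
    rw [List.map_cons, pvScanA_cons, pvTable_get a (by omega)]
    dsimp only
    cases t with
    | nil => simp [ih (a+1) (by omega)]
    | cons c rest =>
      cases rest with
      | cons d r => simp [ih (a+1) (by omega)]
      | nil =>
        by_cases hc : c.toNat = a
        · have : Char.ofNat a = c := by rw [← hc]; exact Char.ofNat_toNat c
          have hw : a ≤ a ∧ a < a + (k+1) := by omega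
          simp [this, hc, hw]
        · have hne : Char.ofNat a ≠ c := by
            intro h
            exact hc (by rw [← h, pvOfNat_toNat a (by omega)])
          simp only [List.cons.injEq, and_true, hne, if_false]
          rw [ih (a+1) (by omega)]
          simp only []
          by_cases hw : a + 1 ≤ c.toNat ∧ c.toNat < a + 1 + k
          · have hw2 : a ≤ c.toNat ∧ c.toNat < a + (k+1) := by omega
            simp [hw, hw2]
          · have : ¬ (a ≤ c.toNat ∧ c.toNat < a + (k+1)) := by omega
            simp [this]
            omega

-- ===== VERDICT (by name: the statement is the Claim_ definition above) =====
theorem get_ascii_spec : Claim_equal_get_ascii := by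
  intro ch _
  show get_ascii ch = get_ascii_alt ch
  have h1 : get_ascii ch = pvScanA pvTable ch.toList (PySem.List.pyRange 0 (pvTable.length : Int) 1) := by
    simp only [get_ascii, pvTable_eq]
  rw [h1]
  have hlen : (pvTable.length : Int) = 128 := by simp [pvTable]
  rw [hlen, PySem.List.pyRange_one]
  have : ((128 : Int) - 0).toNat = 128 := by decide
  rw [this]
  have hmap : (List.range 128).map (fun k : Nat => (0 : Int) + (k : Int))
      = List.map (fun n : Nat => (n : Int)) (List.range' 0 128) := by
    simp [List.range_eq_range']
  rw [hmap, pvScan_spec ch.toList 128 0 (by omega)]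
  unfold get_ascii_alt
  cases htl : ch.toList with
  | nil => rfl
  | cons c rest =>
    cases rest with
    | cons d r => rfl
    | nil =>
      by_cases h : c.toNat < 128
      · have h1 : 0 ≤ c.toNat ∧ c.toNat < 0 + 128 := by omega
        have h2 : (c.toNat : Int) < 128 := by exact_mod_cast h
        simp [h1, h2]
      · have h2 : ¬ ((c.toNat : Int) < 128) := by omega
        simp [h2]
        omega
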